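-- pv_equiv track=rewrite | github.com/yueyue200830/hog_contest | hog_contest2/hog_contest/hog_contest.py | is_swap
-- ===== SOURCE A (Python) =====
-- def is_swap(player_score, opponent_score):
--     """
--     Return whether the two scores should be swapped
--     """
--     # BEGIN PROBLEM 4
--     "*** YOUR CODE HERE ***"
--     player_=[]
--     opponent_=[]
--     flag=False
--     if(player_score==0| opponent_score==0):
--         return False
--     while(player_score!=0):
--         player_.append(player_score%10)
--         player_score=player_score//10
--     while(opponent_score!=0):
--         opponent_.append(opponent_score%10)
--         opponent_score=opponent_score//10
--     min_len=min(len(player_),len(opponent_))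
--     for i in range(0,min_len):
--         if(player_[i]==opponent_[i]):
--            flag=True
--            return True
--
--     return flag
-- ===== SOURCE B (Python) =====
-- def is_swap(player_score, opponent_score):
--     while player_score != 0 and opponent_score != 0:
--         if player_score % 10 == opponent_score % 10:
--             return True
--         player_score //= 10
--         opponent_score //= 10
--     return False
-- ===== Notes on version B (the rewrite author's own statement) =====
-- stated objective: simpler
-- what changed: A builds two digit lists with separate while loops and then scans them by index; B keeps no lists and fuses everything into one while loop that compares the current least-significant digits of both numbers and divides both by 10, returning True on the first match.
import Mathlib
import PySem

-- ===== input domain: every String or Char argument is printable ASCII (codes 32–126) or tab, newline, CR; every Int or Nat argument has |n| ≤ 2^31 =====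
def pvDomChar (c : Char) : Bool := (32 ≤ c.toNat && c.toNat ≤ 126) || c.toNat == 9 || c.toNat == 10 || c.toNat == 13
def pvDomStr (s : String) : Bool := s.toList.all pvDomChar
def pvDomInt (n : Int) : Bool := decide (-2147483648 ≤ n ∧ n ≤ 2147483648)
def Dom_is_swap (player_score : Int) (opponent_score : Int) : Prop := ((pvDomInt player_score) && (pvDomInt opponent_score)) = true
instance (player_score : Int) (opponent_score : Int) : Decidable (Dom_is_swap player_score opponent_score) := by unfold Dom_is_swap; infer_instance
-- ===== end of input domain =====

-- B fuses A's build-two-digit-lists-then-scan into one list-free loop over both numbers' digits (objective: simpler).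

-- ===== PORT A =====
-- the two 'while score != 0' digit-collecting loops; fuel (natAbs + 1) only makes the
-- recursion total — on the nonneg inputs Pre_ admits it never runs out
def pvDigitLoopA (fuel : Nat) (score : Int) (acc : List Int) : List Int :=
  match fuel with
  | 0 => acc
  | f + 1 =>
    if score ≠ 0 then
      pvDigitLoopA f (PySem.Int.floordiv score 10) (acc ++ [PySem.Int.mod score 10])
    else acc

def is_swap (player_score : Int) (opponent_score : Int) : Bool :=
  -- Python's 'player_score==0| opponent_score==0' is the chained comparison
  -- player_score == (0 | opponent_score) == 0
  if player_score == PySem.Int.bor 0 opponent_score && PySem.Int.bor 0 opponent_score == 0 then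
    false
  else
    let player_ := pvDigitLoopA (player_score.natAbs + 1) player_score []
    let opponent_ := pvDigitLoopA (opponent_score.natAbs + 1) opponent_score []
    let min_len := min player_.length opponent_.length
    -- 'for i in range(0, min_len): if player_[i]==opponent_[i]: return True' then 'return flag'
    -- (indices are in range, so Python's player_[i] is getD i 0)
    (List.range min_len).foldl
      (fun flag i => flag || (player_.getD i 0 == opponent_.getD i 0)) false

-- ===== PORT B =====
-- B's single fused while loop; fuel (natAbs + 1) only makes the recursion total
def pvLoopB (fuel : Nat) (player_score : Int) (opponent_score : Int) : Bool :=
  match fuel with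
  | 0 => false
  | f + 1 =>
    if player_score ≠ 0 ∧ opponent_score ≠ 0 then
      if PySem.Int.mod player_score 10 == PySem.Int.mod opponent_score 10 then true
      else pvLoopB f (PySem.Int.floordiv player_score 10) (PySem.Int.floordiv opponent_score 10)
    else false

def is_swap_alt (player_score : Int) (opponent_score : Int) : Bool :=
  pvLoopB (player_score.natAbs + 1) player_score opponent_score

-- ===== PRECONDITION & SPEC =====
-- Pre_ excludes negative scores: there A's 'while score != 0: score //= 10' never
-- terminates (score gets stuck at -1), so A returns on exactly the inputs Pre_ admits.
def Pre_is_swap (player_score : Int) (opponent_score : Int) : Prop :=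
  0 ≤ player_score ∧ 0 ≤ opponent_score
instance (player_score : Int) (opponent_score : Int) : Decidable (Pre_is_swap player_score opponent_score) := by unfold Pre_is_swap; infer_instance

def pvWitness_is_swap : Int × Int := (2025, 14)

def Spec_is_swap (player_score : Int) (opponent_score : Int) (out : Bool) : Prop := out = is_swap_alt player_score opponent_score
instance (player_score : Int) (opponent_score : Int) (out : Bool) : Decidable (Spec_is_swap player_score opponent_score out) := by unfold Spec_is_swap; infer_instance

-- ===== CLAIM (what is proved, stated in full; the proofs are below) =====
def Claim_equal_is_swap : Prop := ∀ (player_score : Int) (opponent_score : Int), Dom_is_swap player_score opponent_score → Pre_is_swap player_score opponent_score → Spec_is_swap player_score opponent_score (is_swap player_score opponent_score)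

-- ===== LEMMAS AND PROOFS =====

-- ideal digit list of a natural number, least significant first
def pvDigits (n : Nat) : List Int :=
  if h : n = 0 then [] else ((n % 10 : Nat) : Int) :: pvDigits (n / 10)
decreasing_by exact Nat.div_lt_self (Nat.pos_of_ne_zero h) (by omega)

theorem pvDigits_zero : pvDigits 0 = [] := by rw [pvDigits, dif_pos rfl]

theorem pvDigits_ne (n : Nat) (hn : n ≠ 0) :
    pvDigits n = ((n % 10 : Nat) : Int) :: pvDigits (n / 10) := by
  rw [pvDigits, dif_neg hn]

-- positional match on two digit lists
def pvAnyZip : List Int → List Int → Bool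
  | a :: la, b :: lb => (a == b) || pvAnyZip la lb
  | _, _ => false

theorem pvAnyZip_nil_right (l : List Int) : pvAnyZip l [] = false := by
  cases l <;> rfl

theorem pvTen : (10 : Int) = ((10 : Nat) : Int) := rfl

theorem pvDigitLoopA_eq (f : Nat) : ∀ (n : Nat) (acc : List Int), n < f →
    pvDigitLoopA f (n : Int) acc = acc ++ pvDigits n := by
  induction f with
  | zero => intro n acc h; omega
  | succ f ih =>
    intro n acc h
    by_cases hn : n = 0
    · subst hn
      rw [pvDigits_zero, pvDigitLoopA]
      simp
    · rw [pvDigitLoopA]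
      rw [if_pos (by exact_mod_cast hn)]
      have hlt : n / 10 < f := by
        have hdd : n / 10 < n := Nat.div_lt_self (Nat.pos_of_ne_zero hn) (by omega)
        omega
      rw [pvTen, PySem.Int.floordiv_natCast, PySem.Int.mod_natCast]
      rw [ih (n / 10) (acc ++ [((n % 10 : Nat) : Int)]) hlt]
      rw [pvDigits_ne n hn]
      simp

theorem pvLoopB_eq (f : Nat) : ∀ (n m : Nat), n < f →
    pvLoopB f (n : Int) (m : Int) = pvAnyZip (pvDigits n) (pvDigits m) := by
  induction f with
  | zero => intro n m h; omega
  | succ f ih =>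
    intro n m h
    by_cases hn : n = 0
    · subst hn
      rw [pvDigits_zero, pvLoopB, if_neg (by simp)]
      rfl
    · by_cases hm : m = 0
      · subst hm
        rw [pvDigits_zero, pvLoopB, if_neg (by simp [hn]), pvAnyZip_nil_right]
      · rw [pvLoopB, if_pos ⟨by exact_mod_cast hn, by exact_mod_cast hm⟩]
        rw [pvTen, PySem.Int.floordiv_natCast, PySem.Int.floordiv_natCast,
            PySem.Int.mod_natCast, PySem.Int.mod_natCast]
        have hlt : n / 10 < f := by
          have hdd : n / 10 < n := Nat.div_lt_self (Nat.pos_of_ne_zero hn) (by omega)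
          omega
        rw [pvDigits_ne n hn, pvDigits_ne m hm, pvAnyZip]
        by_cases he : ((n % 10 : Nat) : Int) = ((m % 10 : Nat) : Int)
        · simp [he]
        · rw [if_neg (by simpa using he), ih (n / 10) (m / 10) hlt,
              beq_eq_false_iff_ne.2 he, Bool.false_or]

theorem pvFoldlOr (l : List Nat) (g : Nat → Bool) : ∀ b : Bool,
    l.foldl (fun flag i => flag || g i) b = (b || l.any g) := by
  induction l with
  | nil => intro b; simp
  | cons x l ih => intro b; simp [List.foldl, ih]; cases b <;> simp

theorem pvScan_eq : ∀ (la lb : List Int),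
    (List.range (min la.length lb.length)).any (fun i => la.getD i 0 == lb.getD i 0)
      = pvAnyZip la lb := by
  intro la
  induction la with
  | nil => intro lb; simp [pvAnyZip]
  | cons a la ih =>
    intro lb
    cases lb with
    | nil => simp [pvAnyZip]
    | cons b lb =>
      have : min (a :: la).length (b :: lb).length = min la.length lb.length + 1 := by
        simp [Nat.succ_min_succ]
      rw [this, List.range_succ_eq_map]
      simp only [List.any_cons, List.any_map]
      rw [pvAnyZip, ← ih lb]
      simp [Function.comp_def]

theorem pvMain (p o : Int) (hp : 0 ≤ p) (ho : 0 ≤ o) :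
    is_swap p o = is_swap_alt p o := by
  obtain ⟨n, rfl⟩ : ∃ n : Nat, p = (n : Int) := ⟨p.toNat, (Int.toNat_of_nonneg hp).symm⟩
  obtain ⟨m, rfl⟩ : ∃ m : Nat, o = (m : Int) := ⟨o.toNat, (Int.toNat_of_nonneg ho).symm⟩
  have hB : is_swap_alt (n : Int) (m : Int) = pvAnyZip (pvDigits n) (pvDigits m) := by
    rw [is_swap_alt, pvLoopB_eq _ n m (by simp)]
  rw [is_swap]
  have hbor : PySem.Int.bor 0 (m : Int) = (m : Int) := by
    rw [PySem.Int.bor_comm]; exact PySem.Int.bor_zero (m : Int)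
  by_cases hg : ((n : Int) == PySem.Int.bor 0 (m : Int) && PySem.Int.bor 0 (m : Int) == 0) = true
  · rw [if_pos hg, hB]
    rw [Bool.and_eq_true] at hg
    obtain ⟨h1, h2⟩ := hg
    have hm0 : m = 0 := by
      have h2' := beq_iff_eq.1 h2
      rw [hbor] at h2'
      exact_mod_cast h2'
    have hn0 : n = 0 := by
      have h1' := beq_iff_eq.1 h1
      rw [hbor] at h1'
      subst hm0
      exact_mod_cast h1'
    subst hm0; subst hn0
    rw [pvDigits_zero, pvAnyZip_nil_right]
  · rw [if_neg hg, hB]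
    simp only []
    rw [pvDigitLoopA_eq _ n [] (by simp), pvDigitLoopA_eq _ m [] (by simp)]
    simp only [List.nil_append]
    rw [pvFoldlOr]
    simp only [Bool.false_or]
    exact pvScan_eq (pvDigits n) (pvDigits m)

-- ===== VERDICT (by name: the statement is the Claim_ definition above) =====
theorem is_swap_spec : Claim_equal_is_swap := by
  intro p o _ hpre
  exact pvMain p o hpre.1 hpre.2
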